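-- pv_equiv track=rewrite | github.com/weichert/squadvault | scripts/_patch_prove_ci_wire_worktree_cleanliness_gate_v1.py | find_insert_after_provenance_or_strict
-- ===== SOURCE A (Python) =====
-- def die(msg: str) -> None:
--     raise SystemExit(f"ERROR: {msg}")
--
-- def find_insert_after_provenance_or_strict(lines: list[str]) -> int:
--     for i, line in enumerate(lines):
--         if "prove_ci provenance" in line:
--             return i + 1
--     for i, line in enumerate(lines):
--         if line.strip() == "set -euo pipefail":
--             return i + 1
--     die("could not find insertion point near strict-mode or provenance banner")
-- ===== SOURCE B (Python) =====
-- def die(msg: str) -> None: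
--     raise SystemExit(f"ERROR: {msg}")
--
-- def find_insert_after_provenance_or_strict(lines: list[str]) -> int:
--     strict_idx = None
--     for i, line in enumerate(lines):
--         if "prove_ci provenance" in line:
--             return i + 1
--         if strict_idx is None and line.strip() == "set -euo pipefail":
--             strict_idx = i
--     if strict_idx is not None:
--         return strict_idx + 1
--     die("could not find insertion point near strict-mode or provenance banner")
-- ===== Notes on version B (the rewrite author's own statement) =====
-- stated objective: alternative
-- what changed: Replaced A's two sequential full scans with a single pass that returns immediately on the provenance banner while recording the first strict-mode line index as a deferred fallback.
import Mathlib
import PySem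

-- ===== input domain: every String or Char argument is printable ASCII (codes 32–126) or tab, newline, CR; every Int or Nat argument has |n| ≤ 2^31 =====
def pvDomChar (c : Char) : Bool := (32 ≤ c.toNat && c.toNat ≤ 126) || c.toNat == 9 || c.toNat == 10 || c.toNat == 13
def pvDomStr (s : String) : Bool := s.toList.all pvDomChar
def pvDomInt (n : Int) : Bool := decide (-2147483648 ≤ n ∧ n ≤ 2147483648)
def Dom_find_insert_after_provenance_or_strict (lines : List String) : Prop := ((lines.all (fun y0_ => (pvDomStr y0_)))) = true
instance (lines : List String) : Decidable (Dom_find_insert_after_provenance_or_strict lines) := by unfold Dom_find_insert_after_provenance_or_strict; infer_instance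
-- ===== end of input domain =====

-- B collapses A's two sequential scans into one pass that records the first strict-banner
-- index as a deferred fallback; equal return values wherever A returns (Pre_).

-- ===== PORT A =====
-- first loop of A: return i+1 at the first line containing "prove_ci provenance"
def pvALoop1 : List String → Int → Option Int
  | [], _ => none
  | l :: rest, i =>
    if PySem.Str.isIn "prove_ci provenance" l then some (i + 1) else pvALoop1 rest (i + 1)

-- second loop of A: return i+1 at the first line with strip() == "set -euo pipefail"
def pvALoop2 : List String → Int → Option Int
  | [], _ => none
  | l :: rest, i =>
    if PySem.Str.strip l == "set -euo pipefail" then some (i + 1) else pvALoop2 rest (i + 1)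

def find_insert_after_provenance_or_strict (lines : List String) : Int :=
  match pvALoop1 lines 0 with
  | some r => r
  | none =>
    match pvALoop2 lines 0 with
    | some r => r
    | none => 0   -- Python raises SystemExit here (die); excluded by Pre_

-- ===== PORT B =====
-- single pass: return on provenance; remember first strict index; fall back after the loop
def pvBLoop : List String → Int → Option Int → Int
  | [], _, strict =>
    match strict with
    | some s => s + 1
    | none => 0   -- Python raises SystemExit here (die); excluded by Pre_
  | l :: rest, i, strict =>
    if PySem.Str.isIn "prove_ci provenance" l then i + 1
    else
      pvBLoop rest (i + 1)
        (if strict.isNone && (PySem.Str.strip l == "set -euo pipefail") then some i else strict)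

def find_insert_after_provenance_or_strict_alt (lines : List String) : Int :=
  pvBLoop lines 0 none

-- ===== PRECONDITION & SPEC =====
-- Pre_ excludes exactly the inputs on which A (and B) raise SystemExit via die():
-- no line contains "prove_ci provenance" and no line strips to "set -euo pipefail".
def Pre_find_insert_after_provenance_or_strict (lines : List String) : Prop :=
  (lines.any (fun l => PySem.Str.isIn "prove_ci provenance" l
                        || (PySem.Str.strip l == "set -euo pipefail"))) = true
instance (lines : List String) : Decidable (Pre_find_insert_after_provenance_or_strict lines) := by
  unfold Pre_find_insert_after_provenance_or_strict; infer_instance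

def pvWitness_find_insert_after_provenance_or_strict : List String :=
  ["#!/bin/bash", "set -euo pipefail", "echo hi"]

def Spec_find_insert_after_provenance_or_strict (lines : List String) (out : Int) : Prop := out = find_insert_after_provenance_or_strict_alt lines
instance (lines : List String) (out : Int) : Decidable (Spec_find_insert_after_provenance_or_strict lines out) := by unfold Spec_find_insert_after_provenance_or_strict; infer_instance

-- ===== CLAIM (what is proved, stated in full; the proofs are below) =====
def Claim_equal_find_insert_after_provenance_or_strict : Prop := ∀ (lines : List String), Dom_find_insert_after_provenance_or_strict lines → Pre_find_insert_after_provenance_or_strict lines → Spec_find_insert_after_provenance_or_strict lines (find_insert_after_provenance_or_strict lines)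

-- ===== LEMMAS AND PROOFS =====

-- Invariant of B's single pass: it equals A's first scan, falling back to the carried
-- strict index, and only then to A's second scan (defaulting to 0).
theorem pvBLoop_eq (lines : List String) : ∀ (i : Int) (strict : Option Int),
    pvBLoop lines i strict =
      match pvALoop1 lines i with
      | some r => r
      | none =>
        match strict with
        | some s => s + 1
        | none => (pvALoop2 lines i).getD 0 := by
  induction lines with
  | nil => intro i strict; cases strict <;> simp [pvBLoop, pvALoop1, pvALoop2]
  | cons l rest ih =>
    intro i strict
    by_cases hp : PySem.Str.isIn "prove_ci provenance" l
    all_goals simp at hp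
    · simp [pvBLoop, pvALoop1, hp]
    · cases strict with
      | some s => simp [pvBLoop, pvALoop1, hp, ih]
      | none =>
        by_cases hs : (PySem.Str.strip l == "set -euo pipefail") = true
        · simp [pvBLoop, pvALoop1, pvALoop2, hp, hs, ih]
        · simp [pvBLoop, pvALoop1, pvALoop2, hp, hs, ih]

theorem ports_eq (lines : List String) :
    find_insert_after_provenance_or_strict lines = find_insert_after_provenance_or_strict_alt lines := by
  unfold find_insert_after_provenance_or_strict find_insert_after_provenance_or_strict_alt
  rw [pvBLoop_eq]
  cases h1 : pvALoop1 lines 0 <;> cases h2 : pvALoop2 lines 0 <;> simp [Option.getD]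

-- ===== VERDICT (by name: the statement is the Claim_ definition above) =====
theorem find_insert_after_provenance_or_strict_spec : Claim_equal_find_insert_after_provenance_or_strict := by
  intro lines _ _
  unfold Spec_find_insert_after_provenance_or_strict
  exact ports_eq lines
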